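-- pv_equiv track=rewrite | github.com/shrizaraj/personalized_fitness_planner | app.py | ai_select_exercises
-- ===== SOURCE A (Python) =====
-- def ai_select_exercises(exercises, user_goal, bmi_status, level):
--     scored_exercises = []
--     for exercise in exercises:
--         name, duration, focus = exercise
--         score = 0
--
--         if user_goal == "fat_loss" and ("Cardio" in focus or "HIIT" in focus):
--             score += 2
--         if user_goal == "muscle_gain" and ("Chest" in focus or "Legs" in focus):
--             score += 2
--
--         if bmi_status in ["Overweight", "Obese"] and "Low impact" in focus:
--             score += 1
--         if bmi_status == "Underweight" and "Bodyweight" in focus: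
--             score += 1
--
--         if level == "beginner" and "Advanced" not in name:
--             score += 1
--         if level == "advanced" and "Advanced" in name:
--             score += 2
--
--         scored_exercises.append((exercise, score))
--
--     scored_exercises.sort(key=lambda x: x[1], reverse=True)
--     top_exercises = [e[0] for e in scored_exercises[:5]]
--     return top_exercises
-- ===== SOURCE B (Python) =====
-- def ai_select_exercises(exercises, user_goal, bmi_status, level):
--     def score(exercise):
--         name, duration, focus = exercise
--         s = 0
--         if user_goal == "fat_loss" and ("Cardio" in focus or "HIIT" in focus):
--             s += 2
--         if user_goal == "muscle_gain" and ("Chest" in focus or "Legs" in focus):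
--             s += 2
--         if bmi_status in ["Overweight", "Obese"] and "Low impact" in focus:
--             s += 1
--         if bmi_status == "Underweight" and "Bodyweight" in focus:
--             s += 1
--         if level == "beginner" and "Advanced" not in name:
--             s += 1
--         if level == "advanced" and "Advanced" in name:
--             s += 2
--         return s
--
--     # bucket sort: scores are always in 0..5
--     buckets = {s: [] for s in range(6)}
--     for exercise in exercises:
--         buckets[score(exercise)].append(exercise)
--     result = []
--     for s in range(5, -1, -1):
--         result += buckets[s]
--     return result[:5]
-- ===== Notes on version B (the rewrite author's own statement) =====
-- stated objective: alternative
-- what changed: Replaces the comparison sort of scored exercises by a single-pass bucket sort: each exercise is appended (in input order) to a dict bucket keyed by its score 0..5, and the result is the concatenation of the buckets from score 5 down to 0, truncated to 5; stability of sorted(reverse=True) is preserved by construction.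
import Mathlib
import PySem

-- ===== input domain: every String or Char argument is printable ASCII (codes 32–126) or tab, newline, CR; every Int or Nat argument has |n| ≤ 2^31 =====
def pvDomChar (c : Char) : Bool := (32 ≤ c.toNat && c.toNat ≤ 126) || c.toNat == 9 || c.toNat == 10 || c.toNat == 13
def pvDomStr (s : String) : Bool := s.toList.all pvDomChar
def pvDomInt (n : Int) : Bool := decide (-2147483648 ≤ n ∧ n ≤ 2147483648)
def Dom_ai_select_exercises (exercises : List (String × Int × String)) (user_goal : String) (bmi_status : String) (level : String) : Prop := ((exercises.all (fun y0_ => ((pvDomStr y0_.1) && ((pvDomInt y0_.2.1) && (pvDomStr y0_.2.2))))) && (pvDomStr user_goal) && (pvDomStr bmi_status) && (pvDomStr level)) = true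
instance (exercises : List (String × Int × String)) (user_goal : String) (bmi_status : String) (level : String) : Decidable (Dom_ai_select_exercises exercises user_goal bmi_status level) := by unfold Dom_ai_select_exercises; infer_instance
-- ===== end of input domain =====

-- ===== PORT A =====
-- B replaces A's comparison sort by a one-pass bucket sort keyed by the score (0..5); return value only, A does not mutate its input.
def ai_select_exercises (exercises : List (String × Int × String)) (user_goal : String) (bmi_status : String) (level : String) : List (String × Int × String) :=
  let scored_exercises : List ((String × Int × String) × Int) :=
    exercises.foldl (fun acc exercise =>
      let name := exercise.1
      let focus := exercise.2.2
      let score : Int := 0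
      let score := if user_goal == "fat_loss" && (PySem.Str.isIn "Cardio" focus || PySem.Str.isIn "HIIT" focus) then score + 2 else score
      let score := if user_goal == "muscle_gain" && (PySem.Str.isIn "Chest" focus || PySem.Str.isIn "Legs" focus) then score + 2 else score
      let score := if (["Overweight", "Obese"].contains bmi_status) && PySem.Str.isIn "Low impact" focus then score + 1 else score
      let score := if bmi_status == "Underweight" && PySem.Str.isIn "Bodyweight" focus then score + 1 else score
      let score := if level == "beginner" && !(PySem.Str.isIn "Advanced" name) then score + 1 else score
      let score := if level == "advanced" && PySem.Str.isIn "Advanced" name then score + 2 else score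
      acc ++ [(exercise, score)]) []
  let sorted := PySem.List.sorted scored_exercises (fun x => x.2) true
  (PySem.List.slice sorted none (some 5)).map (fun e => e.1)

-- ===== PORT B =====
-- the score(exercise) helper of Source B
def pvScoreB (user_goal : String) (bmi_status : String) (level : String) (exercise : String × Int × String) : Int :=
  let name := exercise.1
  let focus := exercise.2.2
  let s : Int := 0
  let s := if user_goal == "fat_loss" && (PySem.Str.isIn "Cardio" focus || PySem.Str.isIn "HIIT" focus) then s + 2 else s
  let s := if user_goal == "muscle_gain" && (PySem.Str.isIn "Chest" focus || PySem.Str.isIn "Legs" focus) then s + 2 else s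
  let s := if (["Overweight", "Obese"].contains bmi_status) && PySem.Str.isIn "Low impact" focus then s + 1 else s
  let s := if bmi_status == "Underweight" && PySem.Str.isIn "Bodyweight" focus then s + 1 else s
  let s := if level == "beginner" && !(PySem.Str.isIn "Advanced" name) then s + 1 else s
  let s := if level == "advanced" && PySem.Str.isIn "Advanced" name then s + 2 else s
  s

def ai_select_exercises_alt (exercises : List (String × Int × String)) (user_goal : String) (bmi_status : String) (level : String) : List (String × Int × String) :=
  -- buckets = {s: [] for s in range(6)}
  let buckets : PySem.Dict Int (List (String × Int × String)) :=
    (PySem.List.pyRange 0 6 1).foldl (fun d s => d.insert s []) PySem.Dict.empty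
  -- for exercise in exercises: buckets[score(exercise)].append(exercise)
  let buckets := exercises.foldl
    (fun d exercise => d.modify (pvScoreB user_goal bmi_status level exercise) [] (fun l => l ++ [exercise])) buckets
  -- result = []; for s in range(5, -1, -1): result += buckets[s]
  let result := (PySem.List.pyRange 5 (-1) (-1)).foldl (fun acc s => acc ++ buckets.getD s []) []
  PySem.List.slice result none (some 5)

-- ===== PRECONDITION & SPEC =====
def Spec_ai_select_exercises (exercises : List (String × Int × String)) (user_goal : String) (bmi_status : String) (level : String) (out : List (String × Int × String)) : Prop := out = ai_select_exercises_alt exercises user_goal bmi_status level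
instance (exercises : List (String × Int × String)) (user_goal : String) (bmi_status : String) (level : String) (out : List (String × Int × String)) : Decidable (Spec_ai_select_exercises exercises user_goal bmi_status level out) := by unfold Spec_ai_select_exercises; infer_instance

-- ===== CLAIM (what is proved, stated in full; the proofs are below) =====
def Claim_equal_ai_select_exercises : Prop := ∀ (exercises : List (String × Int × String)) (user_goal : String) (bmi_status : String) (level : String), Dom_ai_select_exercises exercises user_goal bmi_status level → Spec_ai_select_exercises exercises user_goal bmi_status level (ai_select_exercises exercises user_goal bmi_status level)

-- ===== LEMMAS AND PROOFS =====

-- structural equation of PySem.List.insertBy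
theorem pv_insertBy_cons {a : Type} (before : a -> a -> Bool) (x y : a) (t : List a) :
    PySem.List.insertBy before x (y :: t)
      = if before x y then x :: y :: t else y :: PySem.List.insertBy before x t := rfl

theorem pv_insertBy_append_not {a : Type} (before : a -> a -> Bool) (x : a) (l1 l2 : List a)
    (h : ∀ y ∈ l1, before x y = false) :
    PySem.List.insertBy before x (l1 ++ l2) = l1 ++ PySem.List.insertBy before x l2 := by
  induction l1 with
  | nil => rfl
  | cons y ys ih =>
    simp only [List.cons_append, pv_insertBy_cons, h y (by simp), Bool.false_eq_true, if_false]
    rw [ih (fun z hz => h z (by simp [hz]))]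

theorem pv_insertBy_all {a : Type} (before : a -> a -> Bool) (x : a) (l : List a)
    (h : ∀ y ∈ l, before x y = true) :
    PySem.List.insertBy before x l = x :: l := by
  cases l with
  | nil => rfl
  | cons y t => simp only [pv_insertBy_cons, h y (by simp), if_true]

-- appending an element whose key is in none of the buckets vs leaves those buckets unchanged
theorem pv_flatMap_filter_snoc_ne {a : Type} (key : a -> Int) (x : a) (vs : List Int) (xs : List a)
    (h : ∀ w ∈ vs, key x ≠ w) :
    (vs.flatMap fun v => (xs ++ [x]).filter (fun y => key y == v))
      = vs.flatMap fun v => xs.filter (fun y => key y == v) := by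
  induction vs with
  | nil => rfl
  | cons v vs ih =>
    simp only [List.flatMap_cons]
    rw [ih (fun w hw => h w (by simp [hw])), List.filter_append]
    have hone : List.filter (fun y => key y == v) [x] = [] := by
      simp [h v (by simp)]
    rw [hone]
    simp

-- inserting x into descending buckets appends it to the end of its own bucket
theorem pv_insert_buckets {a : Type} (key : a -> Int) (x : a) (vs : List Int) (xs : List a)
    (hpw : vs.Pairwise (fun p q => q < p)) (hx : key x ∈ vs) :
    PySem.List.insertBy (fun p q => decide (key q < key p)) x
        (vs.flatMap fun v => xs.filter (fun y => key y == v))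
      = vs.flatMap fun v => (xs ++ [x]).filter (fun y => key y == v) := by
  induction vs with
  | nil => cases hx
  | cons v vs ih =>
    have hlt : ∀ w ∈ vs, w < v := fun w hw => (List.pairwise_cons.mp hpw).1 w hw
    simp only [List.flatMap_cons]
    have hmemf : ∀ y ∈ xs.filter (fun y => key y == v), key y = v := fun y hy =>
      eq_of_beq (List.mem_filter.mp hy).2
    rcases List.mem_cons.mp hx with h | h
    · -- key x = v : pass the v-bucket, then insert before everything in the lower buckets
      rw [pv_insertBy_append_not _ _ _ _ (fun y hy => by simp [hmemf y hy, h])]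
      rw [pv_insertBy_all _ _ _ (fun y hy => by
        rcases List.mem_flatMap.mp hy with ⟨w, hw, hyw⟩
        have hkw : key y = w := eq_of_beq (List.mem_filter.mp hyw).2
        simp [hkw, h, hlt w hw])]
      rw [pv_flatMap_filter_snoc_ne key x vs xs (fun w hw hxw => by
        have h1 := hlt w hw
        omega)]
      rw [List.filter_append]
      have hone : List.filter (fun y => key y == v) [x] = [x] := by
        simp [h]
      rw [hone]
      simp
    · -- key x ∈ vs : x's key is strictly below v, so it passes the v-bucket untouched
      have hxv : key x < v := hlt _ h
      rw [pv_insertBy_append_not _ _ _ _ (fun y hy => by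
        simp only [hmemf y hy, decide_eq_false_iff_not]
        omega)]
      rw [ih (List.pairwise_cons.mp hpw).2 h, List.filter_append]
      have hone : List.filter (fun y => key y == v) [x] = [] := by
        have hne : key x ≠ v := by omega
        simp [hne]
      rw [hone]
      simp

-- the stable reverse sort IS the descending bucket concatenation
theorem pv_sorted_rev_buckets {a : Type} (key : a -> Int) (vs : List Int) (xs : List a)
    (hpw : vs.Pairwise (fun p q => q < p)) (hmem : ∀ y ∈ xs, key y ∈ vs) :
    PySem.List.sorted xs key true = vs.flatMap fun v => xs.filter (fun y => key y == v) := by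
  induction xs using List.reverseRecOn with
  | nil => simp [PySem.List.sorted_rev_eq_foldl_insertBy]
  | append_singleton xs x ih =>
    have hxs : ∀ y ∈ xs, key y ∈ vs := fun y hy => hmem y (by simp [hy])
    rw [PySem.List.sorted_rev_eq_foldl_insertBy, List.foldl_append, List.foldl_cons, List.foldl_nil,
      ← PySem.List.sorted_rev_eq_foldl_insertBy, ih hxs]
    exact pv_insert_buckets key x vs xs hpw (hmem x (by simp))

-- every score is one of 5,4,3,2,1,0
theorem pv_score_mem (user_goal bmi_status level : String) (exercise : String × Int × String) :
    pvScoreB user_goal bmi_status level exercise ∈ ([5, 4, 3, 2, 1, 0] : List Int) := by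
  unfold pvScoreB
  simp only [List.mem_cons]
  split_ifs <;> simp_all

-- A's scored list is the map with pvScoreB
theorem pv_A_eq (exercises : List (String × Int × String)) (user_goal bmi_status level : String) :
    ai_select_exercises exercises user_goal bmi_status level
      = (PySem.List.slice (PySem.List.sorted
          (exercises.map (fun exercise => (exercise, pvScoreB user_goal bmi_status level exercise)))
          (fun x => x.2) true) none (some 5)).map (fun e => e.1) := by
  show (PySem.List.slice (PySem.List.sorted
      (List.foldl (fun acc exercise => acc ++ [(exercise, pvScoreB user_goal bmi_status level exercise)]) [] exercises)
      (fun x => x.2) true) none (some 5)).map (fun e => e.1) = _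
  rw [PySem.List.foldl_append_singleton_eq_map
    (fun exercise => (exercise, pvScoreB user_goal bmi_status level exercise)) exercises []]
  rw [List.nil_append]

-- one bucket of B equals the corresponding filter of the input
theorem pv_bucket_eq_filter (exercises : List (String × Int × String)) (user_goal bmi_status level : String)
    (d0 : PySem.Dict Int (List (String × Int × String))) (c : Int) :
    (exercises.foldl
      (fun d exercise => d.modify (pvScoreB user_goal bmi_status level exercise) [] (fun l => l ++ [exercise])) d0).getD c []
      = d0.getD c [] ++ exercises.filter (fun y => pvScoreB user_goal bmi_status level y == c) := by
  have := PySem.Dict.getD_foldl_modify_append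
    (exercises.map (fun exercise => (pvScoreB user_goal bmi_status level exercise, exercise))) d0 c
  rw [List.foldl_map] at this
  rw [this, List.filter_map, List.map_map]
  simp [Function.comp_def]

theorem ai_select_exercises_eq (exercises : List (String × Int × String)) (user_goal bmi_status level : String) :
    ai_select_exercises exercises user_goal bmi_status level
      = ai_select_exercises_alt exercises user_goal bmi_status level := by
  rw [pv_A_eq]
  have hB : ai_select_exercises_alt exercises user_goal bmi_status level
      = PySem.List.slice ((PySem.List.pyRange 5 (-1) (-1)).foldl (fun acc s => acc ++
          (exercises.foldl (fun d exercise =>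
              d.modify (pvScoreB user_goal bmi_status level exercise) [] (fun l => l ++ [exercise]))
            ((PySem.List.pyRange 0 6 1).foldl (fun d s => d.insert s []) PySem.Dict.empty)).getD s []) [])
          none (some 5) := rfl
  rw [hB]
  rw [pv_sorted_rev_buckets (fun (x : (String × Int × String) × Int) => x.2) [5, 4, 3, 2, 1, 0]
    (exercises.map (fun exercise => (exercise, pvScoreB user_goal bmi_status level exercise)))
    (by decide)
    (by
      intro y hy
      rcases List.mem_map.mp hy with ⟨ex, _, rfl⟩
      exact pv_score_mem user_goal bmi_status level ex)]
  rw [PySem.List.slice_to _ (by norm_num), PySem.List.slice_to _ (by norm_num)]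
  have hrange : PySem.List.pyRange 5 (-1) (-1) = [5, 4, 3, 2, 1, 0] := by decide
  rw [hrange]
  simp only [List.foldl_cons, List.foldl_nil, List.nil_append]
  rw [pv_bucket_eq_filter, pv_bucket_eq_filter, pv_bucket_eq_filter,
    pv_bucket_eq_filter, pv_bucket_eq_filter, pv_bucket_eq_filter]
  have hd0 : ∀ c ∈ ([5, 4, 3, 2, 1, 0] : List Int),
      ((PySem.List.pyRange 0 6 1).foldl (fun d s => d.insert s []) PySem.Dict.empty
        : PySem.Dict Int (List (String × Int × String))).getD c [] = [] := by decide
  rw [hd0 5 (by decide), hd0 4 (by decide), hd0 3 (by decide), hd0 2 (by decide),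
    hd0 1 (by decide), hd0 0 (by decide)]
  simp only [List.flatMap_cons, List.flatMap_nil, List.append_nil, List.nil_append,
    List.filter_map]
  simp [Function.comp_def, List.append_assoc]

-- ===== VERDICT (by name: the statement is the Claim_ definition above) =====
theorem ai_select_exercises_spec : Claim_equal_ai_select_exercises := by
  intro exercises user_goal bmi_status level _
  unfold Spec_ai_select_exercises
  exact ai_select_exercises_eq exercises user_goal bmi_status level
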